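-- pv_equiv track=rewrite | github.com/Oswzar/Type-Correction | src/model/bert_corrector.py | _collect_left_context
-- ===== SOURCE A (Python) =====
-- from typing import List, Optional, Tuple
--
-- def _collect_left_context(tokens: List[str], index: int, max_words: int = 8) -> str:
--     """Collect up to max_words of left context."""
--     words = []
--     for token in reversed(tokens[:index]):
--         if token.isalpha():
--             words.append(token)
--             if len(words) >= max_words:
--                 break
--     return " ".join(reversed(words))
-- ===== SOURCE B (Python) =====
-- from typing import List
--
-- def _collect_left_context(tokens: List[str], index: int, max_words: int = 8) -> str:
--     """Collect up to max_words of left context."""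
--     if max_words <= 0:
--         return ""
--     alpha = [t for t in tokens[:index] if t.isalpha()]
--     return " ".join(alpha[-max_words:])
-- ===== Notes on version B (the rewrite author's own statement) =====
-- stated objective: simpler
-- what changed: B replaces the reverse bounded scan with early break by a forward filter of alphabetic tokens followed by a negative-tail slice and join.
-- intended difference: When max_words <= 0 and tokens[:index] contains an alphabetic token, A still returns the rightmost such token (it appends before testing the cap) while B returns the empty string, which is the intended value since at most 0 words were requested. — e.g. on _collect_left_context(["a"], 1, 0): A returns "a", B returns ""
import Mathlib
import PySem

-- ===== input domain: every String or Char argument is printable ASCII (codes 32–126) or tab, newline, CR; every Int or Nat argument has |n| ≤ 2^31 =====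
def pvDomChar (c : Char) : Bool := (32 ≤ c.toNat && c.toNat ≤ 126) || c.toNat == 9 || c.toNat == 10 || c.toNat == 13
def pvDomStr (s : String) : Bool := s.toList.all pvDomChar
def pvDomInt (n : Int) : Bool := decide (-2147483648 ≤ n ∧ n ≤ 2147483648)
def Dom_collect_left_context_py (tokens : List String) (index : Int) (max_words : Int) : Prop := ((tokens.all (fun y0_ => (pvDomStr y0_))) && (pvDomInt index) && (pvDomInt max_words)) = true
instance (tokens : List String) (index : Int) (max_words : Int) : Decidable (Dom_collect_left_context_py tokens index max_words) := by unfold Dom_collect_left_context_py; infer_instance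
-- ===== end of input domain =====

-- B replaces A's reverse bounded scan with early break by a forward filter plus tail slice;
-- outside D_ (max_words ≤ 0 with an alphabetic token present) the return values are proved equal.

-- ===== PORT A =====
-- the 'for token in reversed(tokens[:index])' loop with its break, accumulator = words
def collect_left_context_goA (max_words : Int) : List String → List String → List String
  | [], words => words
  | t :: ts, words =>
    if PySem.Str.strIsalpha t then
      let words' := words ++ [t]
      if (words'.length : Int) ≥ max_words then words'
      else collect_left_context_goA max_words ts words'
    else collect_left_context_goA max_words ts words

def collect_left_context_py (tokens : List String) (index : Int) (max_words : Int) : String :=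
  PySem.Str.join " "
    ((collect_left_context_goA max_words
        (PySem.List.slice tokens none (some index)).reverse []).reverse)

-- ===== PORT B =====
def collect_left_context_py_alt (tokens : List String) (index : Int) (max_words : Int) : String :=
  if max_words ≤ 0 then ""
  else
    let alpha := (PySem.List.slice tokens none (some index)).filter PySem.Str.strIsalpha
    PySem.Str.join " " (PySem.List.slice alpha (some (-max_words)) none)

-- ===== PRECONDITION & SPEC =====
-- When max_words ≤ 0 and tokens[:index] contains an alphabetic token, A still returns the
-- rightmost such token (it appends before testing the cap) while B returns "", the intended
-- value since at most 0 words were requested.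
def D_collect_left_context_py (tokens : List String) (index : Int) (max_words : Int) : Prop :=
  max_words ≤ 0 ∧ ∃ i : Fin tokens.length,
    (i : Int) < (if index < 0 then index + tokens.length else index) ∧
    PySem.Str.strIsalpha (tokens.get i) = true
instance (tokens : List String) (index : Int) (max_words : Int) : Decidable (D_collect_left_context_py tokens index max_words) := by unfold D_collect_left_context_py; infer_instance

def Spec_collect_left_context_py (tokens : List String) (index : Int) (max_words : Int) (out : String) : Prop := ¬ D_collect_left_context_py tokens index max_words → out = collect_left_context_py_alt tokens index max_words
instance (tokens : List String) (index : Int) (max_words : Int) (out : String) : Decidable (Spec_collect_left_context_py tokens index max_words out) := by unfold Spec_collect_left_context_py; infer_instance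

def pvDiffWitness_collect_left_context_py : List String × Int × Int := (["a"], 1, 0)
def pvDiffWitnessOut_collect_left_context_py : String × String := ("a", "")

-- ===== CLAIM (what is proved, stated in full; the proofs are below) =====
def Claim_unchanged_collect_left_context_py : Prop := ∀ (tokens : List String) (index : Int) (max_words : Int), Dom_collect_left_context_py tokens index max_words → Spec_collect_left_context_py tokens index max_words (collect_left_context_py tokens index max_words)
def Claim_changed_collect_left_context_py : Prop := Dom_collect_left_context_py (pvDiffWitness_collect_left_context_py.1) (pvDiffWitness_collect_left_context_py.2.1) (pvDiffWitness_collect_left_context_py.2.2) ∧ D_collect_left_context_py (pvDiffWitness_collect_left_context_py.1) (pvDiffWitness_collect_left_context_py.2.1) (pvDiffWitness_collect_left_context_py.2.2) ∧ collect_left_context_py (pvDiffWitness_collect_left_context_py.1) (pvDiffWitness_collect_left_context_py.2.1) (pvDiffWitness_collect_left_context_py.2.2) = pvDiffWitnessOut_collect_left_context_py.1 ∧ collect_left_context_py_alt (pvDiffWitness_collect_left_context_py.1) (pvDiffWitness_collect_left_context_py.2.1) (pvDiffWitness_collect_left_context_py.2.2) = pvDiffWitnessOut_collect_left_context_py.2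 ∧ pvDiffWitnessOut_collect_left_context_py.1 ≠ pvDiffWitnessOut_collect_left_context_py.2
def Claim_exact_collect_left_context_py : Prop := ∀ (tokens : List String) (index : Int) (max_words : Int), Dom_collect_left_context_py tokens index max_words → D_collect_left_context_py tokens index max_words → collect_left_context_py tokens index max_words ≠ collect_left_context_py_alt tokens index max_words

-- ===== LEMMAS AND PROOFS =====

-- tokens[:index] as a take, for either sign of index
theorem pySliceTo_eq_take (xs : List String) (index : Int) :
    PySem.List.slice xs none (some index)
      = xs.take (if index < 0 then (index + xs.length).toNat else index.toNat) := by
  by_cases h : index < 0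
  · rw [if_pos h]
    have hk : 0 < (-index).toNat := by omega
    have he : index = -(((-index).toNat : Nat) : Int) := by omega
    rw [he, PySem.List.slice_to_neg_natCast xs _ hk]
    congr 1
    omega
  · rw [if_neg h, PySem.List.slice_to xs (by omega : (0:Int) ≤ index)]

theorem any_take_iff (p : String → Bool) (xs : List String) (n : Nat) :
    (xs.take n).any p = true ↔ ∃ i : Fin xs.length, (i : Nat) < n ∧ p (xs.get i) = true := by
  rw [List.any_eq_true]
  constructor
  · rintro ⟨x, hx, hp⟩
    obtain ⟨i, hi, hget⟩ := List.mem_take_iff_getElem.mp hx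
    refine ⟨⟨i, lt_of_lt_of_le hi (Nat.min_le_right _ _)⟩, lt_of_lt_of_le hi (Nat.min_le_left _ _), ?_⟩
    simpa [List.get_eq_getElem, hget] using hp
  · rintro ⟨⟨i, hlen⟩, hin, hp⟩
    exact ⟨xs.get ⟨i, hlen⟩, List.mem_take_iff_getElem.mpr ⟨i, lt_min hin hlen, by simp⟩, hp⟩

-- the membership condition of D_ characterises 'tokens[:index] contains an alphabetic token'
theorem slice_any_iff (tokens : List String) (index : Int) :
    (PySem.List.slice tokens none (some index)).any PySem.Str.strIsalpha = true ↔
      ∃ i : Fin tokens.length,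
        (i : Int) < (if index < 0 then index + tokens.length else index) ∧
        PySem.Str.strIsalpha (tokens.get i) = true := by
  rw [pySliceTo_eq_take, any_take_iff]
  constructor
  · rintro ⟨i, hin, hp⟩
    refine ⟨i, ?_, hp⟩
    split at hin <;> split <;> omega
  · rintro ⟨i, hin, hp⟩
    refine ⟨i, ?_, hp⟩
    have := i.isLt
    split at hin <;> split <;> omega

-- A's loop, started below the cap K = max(max_words, 1), collects the next (K - |words|) alphabetic tokens.
theorem collect_left_context_goA_eq (max_words : Int) (K : Nat)
    (hK : K = (max max_words 1).toNat) :
    ∀ (l words : List String), words.length < K →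
      collect_left_context_goA max_words l words
        = words ++ (l.filter PySem.Str.strIsalpha).take (K - words.length) := by
  intro l
  induction l with
  | nil => intro words _; simp [collect_left_context_goA]
  | cons t ts ih =>
    intro words hw
    by_cases ha : PySem.Str.strIsalpha t
    · simp only [collect_left_context_goA, ha, if_pos, List.filter_cons_of_pos]
      by_cases hb : ((words ++ [t]).length : Int) ≥ max_words
      · have hlen : (words ++ [t]).length = K := by
          simp at hb ⊢; omega
        rw [if_pos hb]
        have : K - words.length = 1 := by simp at hlen; omega
        simp [this]
      · rw [if_neg hb]
        have hlt : (words ++ [t]).length < K := by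
          simp at hb ⊢; omega
        rw [ih (words ++ [t]) hlt]
        have h1 : K - (words ++ [t]).length = K - words.length - 1 := by simp; omega
        have h2 : K - words.length = (K - words.length - 1) + 1 := by omega
        rw [h1, h2, List.take_succ_cons]
        simp
    · have hstep : collect_left_context_goA max_words (t :: ts) words
          = collect_left_context_goA max_words ts words := by
        simp only [collect_left_context_goA]
        rw [if_neg ha]
      rw [hstep, ih words hw, List.filter_cons_of_neg (by simpa using ha)]

-- taking K from the reverse, then reversing, is dropping all but the last K
theorem take_reverse_reverse {α : Type} (xs : List α) (K : Nat) :
    (xs.reverse.take K).reverse = xs.drop (xs.length - K) := by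
  induction xs with
  | nil => simp
  | cons x t ih =>
    by_cases h : t.length < K
    · have h1 : (x :: t).length ≤ K := by simp; omega
      rw [List.take_of_length_le (by simpa using h1), List.reverse_reverse]
      have h2 : (x :: t).length - K = 0 := by omega
      rw [h2, List.drop_zero]
    · have : (x :: t).reverse.take K = t.reverse.take K := by
        rw [List.reverse_cons, List.take_append_of_le_length (by simpa using Nat.le_of_not_lt h)]
      rw [this, ih]
      have : (x :: t).length - K = (t.length - K) + 1 := by simp; omega
      rw [this, List.drop_succ_cons]

-- A's result in closed form: the last K = max(max_words, 1) alphabetic tokens of tokens[:index], joined.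
theorem collect_left_context_py_closed (tokens : List String) (index : Int) (max_words : Int) :
    collect_left_context_py tokens index max_words
      = PySem.Str.join " "
          (((PySem.List.slice tokens none (some index)).filter PySem.Str.strIsalpha).drop
            (((PySem.List.slice tokens none (some index)).filter PySem.Str.strIsalpha).length
              - (max max_words 1).toNat)) := by
  unfold collect_left_context_py
  set s := PySem.List.slice tokens none (some index) with hs
  set K : Nat := (max max_words 1).toNat with hKdef
  have hK1 : 1 ≤ K := by rw [hKdef]; omega
  rw [collect_left_context_goA_eq max_words K rfl s.reverse [] (by simpa using hK1)]
  simp only [List.nil_append, List.length_nil, Nat.sub_zero]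
  rw [show List.filter PySem.Str.strIsalpha s.reverse
        = (s.filter PySem.Str.strIsalpha).reverse from List.filter_reverse]
  rw [take_reverse_reverse]

theorem collect_left_context_py_spec : Claim_unchanged_collect_left_context_py := by
  intro tokens index max_words _ hD
  rw [collect_left_context_py_closed]
  unfold collect_left_context_py_alt
  set s := PySem.List.slice tokens none (some index) with hs
  set F := s.filter PySem.Str.strIsalpha with hF
  by_cases hm : max_words ≤ 0
  · have hFnil : F = [] := by
      have hna : ¬ s.any PySem.Str.strIsalpha = true := by
        intro h
        exact hD ⟨hm, (slice_any_iff tokens index).mp (hs ▸ h)⟩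
      rw [hF]
      simpa [List.filter_eq_nil_iff, List.any_eq_true] using hna
    rw [if_pos hm, hFnil]
    simp [PySem.Str.join]
  · rw [if_neg hm]
    have hm1 : 1 ≤ max_words := by omega
    set K : Nat := max_words.toNat with hKdef
    have hmax : (max max_words 1).toNat = K := by omega
    have hcast : -max_words = -(K : Int) := by omega
    rw [hmax, hcast]
    show PySem.Str.join " " (List.drop (F.length - K) F)
        = PySem.Str.join " " (PySem.List.slice F (some (-(K : Int))) none)
    rw [PySem.List.slice_from_neg_natCast F K (by omega)]

theorem collect_left_context_py_changed : Claim_changed_collect_left_context_py := by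
  unfold Claim_changed_collect_left_context_py; decide

-- join " " of the singleton left by dropping all but the last element is that element, which is
-- nonempty whenever strIsalpha holds of it
theorem drop_length_sub_one_singleton {α : Type} (xs : List α) (h : xs ≠ []) :
    ∃ t, t ∈ xs ∧ xs.drop (xs.length - 1) = [t] := by
  induction xs with
  | nil => exact absurd rfl h
  | cons x t ih =>
    cases t with
    | nil => exact ⟨x, by simp, by simp⟩
    | cons y u =>
      obtain ⟨t0, hm, he⟩ := ih (by simp)
      refine ⟨t0, List.mem_cons_of_mem _ hm, ?_⟩
      have hlen : (x :: y :: u).length - 1 = ((y :: u).length - 1) + 1 := by simp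
      rw [hlen, List.drop_succ_cons, he]

theorem strIsalpha_ne_empty (t : String) (h : PySem.Str.strIsalpha t = true) : t ≠ "" := by
  intro he
  rw [he] at h
  exact absurd h (by decide)

theorem collect_left_context_py_tight : Claim_exact_collect_left_context_py := by
  intro tokens index max_words _ hD
  obtain ⟨hm, hex⟩ := hD
  have hany : (PySem.List.slice tokens none (some index)).any PySem.Str.strIsalpha = true :=
    (slice_any_iff tokens index).mpr hex
  rw [collect_left_context_py_closed]
  unfold collect_left_context_py_alt
  rw [if_pos hm]
  set s := PySem.List.slice tokens none (some index) with hs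
  set F := s.filter PySem.Str.strIsalpha with hF
  have hFne : F ≠ [] := by
    rw [hF]
    simp only [ne_eq, List.filter_eq_nil_iff]
    intro hall
    rcases List.any_eq_true.mp hany with ⟨t, ht, hta⟩
    exact hall t ht hta
  have hmax : (max max_words 1).toNat = 1 := by omega
  obtain ⟨t, htmem, heq⟩ := drop_length_sub_one_singleton F hFne
  rw [hmax, heq]
  have hta : PySem.Str.strIsalpha t = true := by
    have := htmem
    rw [hF] at this
    exact (List.mem_filter.mp this).2
  have hne := strIsalpha_ne_empty _ hta
  simpa [PySem.Str.join] using hne
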